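-- pv_equiv track=rewrite | github.com/protonish/cipherdaug-nmt | cipher/encipher.py | get_char_vocab
-- ===== SOURCE A (Python) =====
-- from collections import Counter
--
-- def get_char_vocab(text, alphaonly=False, loweronly=False, upperonly=False):
--     char_counter = Counter()
--     for line in text:
--         if alphaonly:
--             if loweronly:
--                 char_counter.update(c for c in line if c.isalpha() and c.islower())
--             elif upperonly:
--                 char_counter.update(c for c in line if c.isalpha() and c.isupper())
--             else:
--                 char_counter.update(c for c in line if c.isalpha())
--         else:
--             char_counter.update(c for c in line)
--
--     chars = sorted(char_counter.keys())
--     return chars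
-- ===== SOURCE B (Python) =====
-- def get_char_vocab(text, alphaonly=False, loweronly=False, upperonly=False):
--     if not alphaonly:
--         keep = lambda c: True
--     elif loweronly:
--         keep = lambda c: c.isalpha() and c.islower()
--     elif upperonly:
--         keep = lambda c: c.isalpha() and c.isupper()
--     else:
--         keep = lambda c: c.isalpha()
--     ordered = sorted(c for line in text for c in line if keep(c))
--     out = []
--     for c in ordered:
--         if not out or out[-1] != c:
--             out.append(c)
--     return out
-- ===== Notes on version B (the rewrite author's own statement) =====
-- stated objective: alternative
-- what changed: B replaces A's Counter-of-filtered-characters-then-sort-keys by sort-then-scan: it flattens all lines into one filtered multiset, sorts it, and deduplicates by comparing each character with the last one emitted.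
import Mathlib
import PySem

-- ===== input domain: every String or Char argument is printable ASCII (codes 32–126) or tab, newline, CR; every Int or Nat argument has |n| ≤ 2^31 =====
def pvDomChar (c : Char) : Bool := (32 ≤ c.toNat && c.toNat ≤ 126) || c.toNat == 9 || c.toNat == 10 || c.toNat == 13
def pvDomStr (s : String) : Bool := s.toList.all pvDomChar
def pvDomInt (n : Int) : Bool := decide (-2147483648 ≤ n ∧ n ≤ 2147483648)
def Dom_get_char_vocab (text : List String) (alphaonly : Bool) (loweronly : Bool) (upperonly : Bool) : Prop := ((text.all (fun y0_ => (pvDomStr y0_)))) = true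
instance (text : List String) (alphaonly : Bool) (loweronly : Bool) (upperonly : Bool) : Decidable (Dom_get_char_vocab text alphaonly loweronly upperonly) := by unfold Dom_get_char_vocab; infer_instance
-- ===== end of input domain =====

-- B replaces A's filtered Counter accumulation by sort-then-scan: flatten all lines into one
-- filtered list, sort it, and deduplicate adjacent equal characters (objective: alternative).

-- ===== PORT A =====
-- Counter(); per line: counter.update over a filtered generator; then sorted(keys).
def get_char_vocab (text : List String) (alphaonly : Bool) (loweronly : Bool) (upperonly : Bool) : List String :=
  let char_counter : PySem.Dict Char Int :=
    text.foldl (fun d line =>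
      if alphaonly then
        if loweronly then
          (line.toList.filter (fun c => PySem.Chars.isalpha c && PySem.Chars.islower c)).foldl
            (fun d c => d.modify c 0 (· + 1)) d
        else if upperonly then
          (line.toList.filter (fun c => PySem.Chars.isalpha c && PySem.Chars.isupper c)).foldl
            (fun d c => d.modify c 0 (· + 1)) d
        else
          (line.toList.filter (fun c => PySem.Chars.isalpha c)).foldl
            (fun d c => d.modify c 0 (· + 1)) d
      else
        line.toList.foldl (fun d c => d.modify c 0 (· + 1)) d) PySem.Dict.empty
  (PySem.List.sorted char_counter.keys (fun c => c) false).map (fun c => String.mk [c])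

-- ===== PORT B =====
-- keep = the selected predicate (lambda chain in Source B)
def gcvKeep (alphaonly : Bool) (loweronly : Bool) (upperonly : Bool) (c : Char) : Bool :=
  if !alphaonly then true
  else if loweronly then PySem.Chars.isalpha c && PySem.Chars.islower c
  else if upperonly then PySem.Chars.isalpha c && PySem.Chars.isupper c
  else PySem.Chars.isalpha c

-- sorted filtered flattening, then adjacent-dedup scan comparing with out[-1]
def get_char_vocab_alt (text : List String) (alphaonly : Bool) (loweronly : Bool) (upperonly : Bool) : List String :=
  let keep := gcvKeep alphaonly loweronly upperonly
  let ordered := PySem.List.sorted ((text.flatMap (fun line => line.toList)).filter keep) (fun c => c) false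
  let out := ordered.foldl (fun out c =>
      if out = [] ∨ out.getLast? ≠ some c then out ++ [c] else out) []
  out.map (fun c => String.mk [c])

-- ===== PRECONDITION & SPEC =====
def Spec_get_char_vocab (text : List String) (alphaonly : Bool) (loweronly : Bool) (upperonly : Bool) (out : List String) : Prop := out = get_char_vocab_alt text alphaonly loweronly upperonly
instance (text : List String) (alphaonly : Bool) (loweronly : Bool) (upperonly : Bool) (out : List String) : Decidable (Spec_get_char_vocab text alphaonly loweronly upperonly out) := by unfold Spec_get_char_vocab; infer_instance

-- ===== CLAIM (what is proved, stated in full; the proofs are below) =====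
def Claim_equal_get_char_vocab : Prop := ∀ (text : List String) (alphaonly : Bool) (loweronly : Bool) (upperonly : Bool), Dom_get_char_vocab text alphaonly loweronly upperonly → Spec_get_char_vocab text alphaonly loweronly upperonly (get_char_vocab text alphaonly loweronly upperonly)

-- ===== LEMMAS AND PROOFS =====

-- A's key set after the counting loop, expressed as a fold of set updates over the filtered lines.
theorem gcv_keys_foldl (p : Char → Bool) (text : List String) (d : PySem.Dict Char Int) :
    (text.foldl (fun d line =>
        (line.toList.filter p).foldl (fun d c => d.modify c 0 (· + 1)) d) d).keys
      = text.foldl (fun ks line => PySem.Set.update ks (line.toList.filter p)) d.keys := by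
  induction text generalizing d with
  | nil => rfl
  | cons line rest ih =>
      simp only [List.foldl_cons, ih, PySem.Dict.keys_foldl_modify]

theorem gcv_mem_foldl_update (g : String → List Char) (text : List String) (s : List Char) (c : Char) :
    c ∈ text.foldl (fun s line => PySem.Set.update s (g line)) s
      ↔ c ∈ s ∨ ∃ line ∈ text, c ∈ g line := by
  induction text generalizing s with
  | nil => simp
  | cons line rest ih =>
      simp only [List.foldl_cons, ih, PySem.Set.mem_update, List.mem_cons]
      constructor
      · rintro ((h | h) | ⟨l, hl, hc⟩)
        · exact Or.inl h
        · exact Or.inr ⟨line, Or.inl rfl, h⟩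
        · exact Or.inr ⟨l, Or.inr hl, hc⟩
      · rintro (h | ⟨l, (rfl | hl), hc⟩)
        · exact Or.inl (Or.inl h)
        · exact Or.inl (Or.inr hc)
        · exact Or.inr ⟨l, hl, hc⟩

theorem gcv_nodup_foldl_update (g : String → List Char) (text : List String) (s : List Char)
    (h : s.Nodup) :
    (text.foldl (fun s line => PySem.Set.update s (g line)) s).Nodup := by
  induction text generalizing s with
  | nil => exact h
  | cons line rest ih => exact ih _ (PySem.Set.nodup_update _ _ h)

-- every member of a strictly increasing list is ≤ its last element
theorem gcv_mem_le_getLast (l : List Char) :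
    l.Pairwise (· < ·) → ∀ a ∈ l, ∀ m, l.getLast? = some m → a ≤ m := by
  induction l with
  | nil => simp
  | cons x t ih =>
      intro h a ha m hm
      cases t with
      | nil =>
          simp at hm ha; subst hm; subst ha; exact le_refl _
      | cons y u =>
          rw [List.getLast?_cons_cons] at hm
          rcases List.mem_cons.mp ha with rfl | ha'
          · have hy : a < y := (List.pairwise_cons.mp h).1 y (by simp)
            have := ih (List.pairwise_cons.mp h).2 y (by simp) m hm
            exact le_of_lt (lt_of_lt_of_le hy this)
          · exact ih (List.pairwise_cons.mp h).2 a ha' m hm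

-- the dedup fold invariant: over a ≤-sorted input, starting from a strictly increasing
-- accumulator dominated by the input, the scan stays strictly increasing and collects
-- exactly the members.
theorem gcv_dedup_inv (S acc : List Char)
    (hS : S.Pairwise (· ≤ ·)) (hacc : acc.Pairwise (· < ·))
    (hle : ∀ a ∈ acc, ∀ b ∈ S, a ≤ b) :
    (S.foldl (fun out c => if out = [] ∨ out.getLast? ≠ some c then out ++ [c] else out) acc).Pairwise (· < ·)
    ∧ ∀ c, (c ∈ S.foldl (fun out c => if out = [] ∨ out.getLast? ≠ some c then out ++ [c] else out) acc
            ↔ c ∈ acc ∨ c ∈ S) := by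
  induction S generalizing acc with
  | nil => exact ⟨hacc, fun c => by simp⟩
  | cons c rest ih =>
      have hrest : rest.Pairwise (· ≤ ·) := (List.pairwise_cons.mp hS).2
      have hcle : ∀ b ∈ rest, c ≤ b := (List.pairwise_cons.mp hS).1
      simp only [List.foldl_cons]
      by_cases hc : acc = [] ∨ acc.getLast? ≠ some c
      · rw [if_pos hc]
        have hlt : ∀ a ∈ acc, a < c := by
          intro a ha
          have h1 : a ≤ c := hle a ha c (by simp)
          rcases eq_or_lt_of_le h1 with heq | h2
          · exfalso
            rcases hc with hnil | hne
            · subst hnil; simp at ha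
            · have hnem : acc ≠ [] := fun hh => by subst hh; simp at ha
              have hm : acc.getLast? = some (acc.getLast hnem) :=
                List.getLast?_eq_some_getLast hnem
              have h3 : a ≤ acc.getLast hnem := gcv_mem_le_getLast acc hacc a ha _ hm
              have h4 : acc.getLast hnem ∈ acc := List.mem_of_getLast? hm
              have h5 : acc.getLast hnem ≤ a := hle _ h4 a (List.mem_cons.mpr (Or.inl heq))
              exact hne (hm.trans (by rw [le_antisymm h5 h3, heq]))
          · exact h2
        have hacc' : (acc ++ [c]).Pairwise (· < ·) := by
          rw [List.pairwise_append]
          exact ⟨hacc, by simp, by intro a ha b hb; simp at hb; subst hb; exact hlt a ha⟩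
        have hle' : ∀ a ∈ acc ++ [c], ∀ b ∈ rest, a ≤ b := by
          intro a ha b hb
          rcases List.mem_append.mp ha with h | h
          · exact hle a h b (by simp [hb])
          · simp at h; subst h; exact hcle b hb
        obtain ⟨hp, hm⟩ := ih (acc ++ [c]) hrest hacc' hle'
        refine ⟨hp, fun x => ?_⟩
        rw [hm x]; simp only [List.mem_append, List.mem_cons]; tauto
      · rw [if_neg hc]
        push_neg at hc
        have hcmem : c ∈ acc := List.mem_of_getLast? hc.2
        have hle' : ∀ a ∈ acc, ∀ b ∈ rest, a ≤ b := fun a ha b hb => hle a ha b (by simp [hb])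
        obtain ⟨hp, hm⟩ := ih acc hrest hacc hle'
        refine ⟨hp, fun x => ?_⟩
        rw [hm x]; simp only [List.mem_cons]
        constructor
        · tauto
        · rintro (h | rfl | h)
          · exact Or.inl h
          · exact Or.inl hcmem
          · exact Or.inr h

-- core: for any predicate p, sorted keys of the filtered counter = adjacent-dedup of the
-- sorted filtered flattening.
theorem gcv_core (p : Char → Bool) (text : List String) :
    PySem.List.sorted
        (text.foldl (fun ks line => PySem.Set.update ks (line.toList.filter p)) ([] : List Char))
        (fun c => c) false
      = (PySem.List.sorted ((text.flatMap (fun line => line.toList)).filter p) (fun c => c) false).foldl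
          (fun out c => if out = [] ∨ out.getLast? ≠ some c then out ++ [c] else out) [] := by
  set L := (text.flatMap (fun line => line.toList)).filter p with hL
  set S := PySem.List.sorted L (fun c => c) false with hSdef
  have hS : S.Pairwise (· ≤ ·) := PySem.List.sorted_pairwise L (fun c => c)
  obtain ⟨hp, hm⟩ := gcv_dedup_inv S [] hS List.Pairwise.nil (by simp)
  set D := S.foldl (fun out c => if out = [] ∨ out.getLast? ≠ some c then out ++ [c] else out) [] with hD
  have hmemD : ∀ c, c ∈ D ↔ c ∈ L := by
    intro c; rw [hm c]; simp [hSdef, PySem.List.mem_sorted]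
  have hK := gcv_mem_foldl_update (fun line => line.toList.filter p) text [] -- membership of keys fold
  have hmemK : ∀ c, c ∈ text.foldl (fun ks line => PySem.Set.update ks (line.toList.filter p)) ([] : List Char)
      ↔ c ∈ L := by
    intro c; rw [hK c]; simp [hL, List.mem_filter, List.mem_flatMap]
    constructor
    · rintro ⟨l, hl, hc, hpc⟩; exact ⟨⟨l, hl, hc⟩, hpc⟩
    · rintro ⟨⟨l, hl, hc⟩, hpc⟩; exact ⟨l, hl, hc, hpc⟩
  have hperm : D.Perm (text.foldl (fun ks line => PySem.Set.update ks (line.toList.filter p)) ([] : List Char)) := by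
    rw [List.perm_ext_iff_of_nodup hp.nodup (gcv_nodup_foldl_update _ _ _ List.nodup_nil)]
    intro c; rw [hmemD c, hmemK c]
  exact PySem.List.sorted_eq_of_perm_of_pairwise_lt _ D (fun c => c) hperm hp

-- ===== VERDICT (by name: the statement is the Claim_ definition above) =====
theorem get_char_vocab_spec : Claim_equal_get_char_vocab := by
  intro text alphaonly loweronly upperonly _
  show _ = _
  unfold get_char_vocab get_char_vocab_alt gcvKeep
  cases alphaonly with
  | true =>
      cases loweronly with
      | true =>
          simp only [if_true, Bool.not_true, Bool.false_eq_true, ite_false]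
          rw [gcv_keys_foldl, PySem.Dict.keys_empty, gcv_core]
      | false =>
          cases upperonly with
          | true =>
              simp only [Bool.not_true, Bool.false_eq_true, ite_false, ite_true]
              rw [gcv_keys_foldl, PySem.Dict.keys_empty, gcv_core]
          | false =>
              simp only [Bool.not_true, Bool.false_eq_true, ite_false, ite_true]
              rw [gcv_keys_foldl, PySem.Dict.keys_empty, gcv_core]
  | false =>
      simp only [Bool.not_false, Bool.false_eq_true, ite_false, ite_true]
      have h1 : (fun (d : PySem.Dict Char Int) (line : String) =>
            line.toList.foldl (fun d c => d.modify c 0 (· + 1)) d)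
          = (fun d line =>
            (line.toList.filter (fun _ => true)).foldl (fun d c => d.modify c 0 (· + 1)) d) := by
        funext d line; simp
      rw [h1, gcv_keys_foldl, PySem.Dict.keys_empty, gcv_core]
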